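-- pv_equiv track=rewrite | github.com/pepze21/Coding_practice_Programers | bangui_kaesu_lv5.py | solution
-- ===== SOURCE A (Python) =====
-- def solution(arrows):
--     answer = 0
--     visit_v = set()
--     visit_e = set()
--     d = [[-1, +0],
--          [-1, +1],
--          [+0, +1],
--          [+1, +1],
--          [+1, +0],
--          [+1, -1],
--          [+0, -1],
--          [-1, -1]]
--     i = j = 0
--     visit_v.add((i, j))
--     cnt = 0
--     for arrow in arrows:
--         di, dj = d[arrow]
--         cnt += 1
--         pre_i = i
--         pre_j = j
--         i += di
--         j += dj
--         if ((i, j, pre_i, pre_j) not in visit_e) and ((i, j) in visit_v):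
--             answer += 1
--         if ((i, j, pre_i, pre_j) not in visit_e) and (arrow % 2 != 0) and ((i, pre_j, pre_i, j) in visit_e):
--             answer += 1
--         visit_v.add((i, j))
--         visit_e.add((i, j, pre_i, pre_j))
--         visit_e.add((pre_i, pre_j, i, j))
--     return answer
-- ===== SOURCE B (Python) =====
-- def solution(arrows):
--     # Walk the path on a grid scaled by 2, one arrow = two half-steps, so two
--     # crossing diagonals share their midpoint as a real vertex; then a single
--     # uniform rule counts cycles: +1 whenever a new edge reaches a visited vertex.
--     d = [[-1, +0], [-1, +1], [+0, +1], [+1, +1],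
--          [+1, +0], [+1, -1], [+0, -1], [-1, -1]]
--     x = y = 0
--     vertices = {(0, 0)}
--     edges = set()
--     answer = 0
--     for arrow in arrows:
--         dx, dy = d[arrow]
--         for _ in range(2):
--             nx, ny = x + dx, y + dy
--             if (nx, ny, x, y) not in edges and (nx, ny) in vertices:
--                 answer += 1
--             vertices.add((nx, ny))
--             edges.add((nx, ny, x, y))
--             edges.add((x, y, nx, ny))
--             x, y = nx, ny
--     return answer
-- ===== Notes on version B (the rewrite author's own statement) =====
-- stated objective: alternative
-- what changed: B walks the path on a grid scaled by 2, turning each arrow into two half-steps so crossing diagonals meet at a shared midpoint vertex, and counts loops with one uniform rule (+1 whenever a not-yet-traversed edge reaches an already-visited vertex), replacing A's special parity branch and crossing-edge test.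
import Mathlib
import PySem

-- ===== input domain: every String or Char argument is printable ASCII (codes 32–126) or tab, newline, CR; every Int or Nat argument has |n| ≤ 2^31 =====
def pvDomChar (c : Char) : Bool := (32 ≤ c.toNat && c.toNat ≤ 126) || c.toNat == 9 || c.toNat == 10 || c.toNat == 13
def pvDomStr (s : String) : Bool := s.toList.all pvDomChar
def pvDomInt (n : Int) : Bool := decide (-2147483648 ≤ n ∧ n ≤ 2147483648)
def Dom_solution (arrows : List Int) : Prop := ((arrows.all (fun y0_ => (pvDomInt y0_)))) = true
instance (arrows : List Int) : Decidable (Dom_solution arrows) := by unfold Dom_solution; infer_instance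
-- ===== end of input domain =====

-- B counts the same loops by walking the path on a grid scaled by 2 (one arrow = two
-- half-steps, so crossing diagonals share their midpoint vertex) with one uniform
-- rule (+1 when a new edge reaches a visited vertex), replacing A's parity branch and
-- crossing-edge check; objective: alternative (same cost), equivalence of return values.

-- the direction table 'd' (identical in both Python programs)
def pvDirs : List (Int × Int) :=
  [(-1, 0), (-1, 1), (0, 1), (1, 1), (1, 0), (1, -1), (0, -1), (-1, -1)]

-- ===== PORT A =====
-- loop body of A; state = (answer, visit_v, visit_e, i, j); the variable 'cnt' of A is
-- written but never read and is omitted. 'd[arrow]' is pyGet?; on 'none' Python raises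
-- IndexError (excluded by Pre_solution) and the port returns the state unchanged.
def solutionStep
    (st : Int × PySem.Set (Int × Int) × PySem.Set (Int × Int × Int × Int) × Int × Int)
    (arrow : Int) :
    Int × PySem.Set (Int × Int) × PySem.Set (Int × Int × Int × Int) × Int × Int :=
  match PySem.List.pyGet? pvDirs arrow with
  | none => st
  | some (di, dj) =>
    match st with
    | (answer, vv, ve, pi, pj) =>
      let i := pi + di
      let j := pj + dj
      let answer1 := if (i, j, pi, pj) ∉ ve ∧ (i, j) ∈ vv then answer + 1 else answer
      let answer2 := if (i, j, pi, pj) ∉ ve ∧ PySem.Int.mod arrow 2 ≠ 0 ∧ (i, pj, pi, j) ∈ ve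
        then answer1 + 1 else answer1
      (answer2, PySem.Set.add vv (i, j),
        PySem.Set.add (PySem.Set.add ve (i, j, pi, pj)) (pi, pj, i, j), i, j)

def solution (arrows : List Int) : Int :=
  (arrows.foldl solutionStep
    (0, PySem.Set.add PySem.Set.empty ((0 : Int), (0 : Int)), PySem.Set.empty, 0, 0)).1

-- ===== PORT B =====
-- one half-step of B; state = (answer, vertices, edges, x, y)
def solutionAltHalf (dx dy : Int)
    (st : Int × PySem.Set (Int × Int) × PySem.Set (Int × Int × Int × Int) × Int × Int) :
    Int × PySem.Set (Int × Int) × PySem.Set (Int × Int × Int × Int) × Int × Int :=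
  match st with
  | (answer, vertices, edges, x, y) =>
    let nx := x + dx
    let ny := y + dy
    let answer' := if (nx, ny, x, y) ∉ edges ∧ (nx, ny) ∈ vertices then answer + 1 else answer
    (answer', PySem.Set.add vertices (nx, ny),
      PySem.Set.add (PySem.Set.add edges (nx, ny, x, y)) (x, y, nx, ny), nx, ny)

-- loop body of B; 'for _ in range(2)' unrolled into two applications of the half-step
def solutionAltStep
    (st : Int × PySem.Set (Int × Int) × PySem.Set (Int × Int × Int × Int) × Int × Int)
    (arrow : Int) :
    Int × PySem.Set (Int × Int) × PySem.Set (Int × Int × Int × Int) × Int × Int :=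
  match PySem.List.pyGet? pvDirs arrow with
  | none => st
  | some (dx, dy) => solutionAltHalf dx dy (solutionAltHalf dx dy st)

def solution_alt (arrows : List Int) : Int :=
  (arrows.foldl solutionAltStep
    (0, PySem.Set.ofList [((0 : Int), (0 : Int))], PySem.Set.empty, 0, 0)).1

-- ===== PRECONDITION & SPEC =====
-- Pre_ excludes exactly the inputs on which Python A raises IndexError (d[arrow] with
-- arrow outside -8..7); B raises the same IndexError there.
def Pre_solution (arrows : List Int) : Prop := ∀ a ∈ arrows, -8 ≤ a ∧ a < 8
instance (arrows : List Int) : Decidable (Pre_solution arrows) := by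
  unfold Pre_solution; infer_instance

def pvWitness_solution : List Int := [4, 4, 2, 2, 0, 0, 6, 6]

def Spec_solution (arrows : List Int) (out : Int) : Prop := out = solution_alt arrows
instance (arrows : List Int) (out : Int) : Decidable (Spec_solution arrows out) := by
  unfold Spec_solution; infer_instance

-- ===== CLAIM (what is proved, stated in full; the proofs are below) =====
def Claim_equal_solution : Prop :=
  ∀ (arrows : List Int), Dom_solution arrows → Pre_solution arrows →
    Spec_solution arrows (solution arrows)

-- ===== LEMMAS AND PROOFS =====

-- facts about the direction table: the entry is a unit step and arrow's parity
-- (the test 'arrow % 2 != 0' of A) says whether the step is diagonal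
lemma dirs_facts (arrow u v : Int) (h : PySem.List.pyGet? pvDirs arrow = some (u, v)) :
    (u = -1 ∨ u = 0 ∨ u = 1) ∧ (v = -1 ∨ v = 0 ∨ v = 1) ∧ ¬(u = 0 ∧ v = 0) ∧
    (PySem.Int.mod arrow 2 = 0 ↔ (u = 0 ∨ v = 0)) := by
  have hlo : -8 ≤ arrow := by
    by_contra hc
    have : PySem.List.pyGet? pvDirs arrow = none := by
      rw [PySem.List.pyGet?_eq_none_iff]
      simp [PySem.Raise.InRange, pvDirs]; omega
    simp [this] at h
  have hhi : arrow < 8 := by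
    by_contra hc
    have : PySem.List.pyGet? pvDirs arrow = none := by
      rw [PySem.List.pyGet?_eq_none_iff]
      simp [PySem.Raise.InRange, pvDirs]; omega
    simp [this] at h
  have hm : PySem.Int.mod arrow 2 = arrow % 2 := PySem.Int.mod_eq_emod_of_pos (by omega)
  rw [hm]
  interval_cases arrow <;>
    simp_all [pvDirs, PySem.List.pyGet?, PySem.List.pyIdx?, Prod.mk.injEq] <;> omega

-- (p,q) is a vertex of B's doubled graph: an A-vertex scaled by 2, or the midpoint of
-- a traversed segment
def VertRep (vv : List (Int × Int)) (ve : List (Int × Int × Int × Int)) (p q : Int) : Prop :=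
  (∃ a b, p = 2*a ∧ q = 2*b ∧ (a, b) ∈ vv) ∨
  (∃ a b c d, (a, b, c, d) ∈ ve ∧ p = a + c ∧ q = b + d)

-- (p,q,r,s) is a directed half-edge of B's doubled graph: endpoint-to-midpoint or
-- midpoint-to-endpoint of a traversed segment
def EdgeRep (ve : List (Int × Int × Int × Int)) (p q r s : Int) : Prop :=
  ∃ a b c d, (a, b, c, d) ∈ ve ∧
    ((p = 2*a ∧ q = 2*b ∧ r = a + c ∧ s = b + d) ∨
     (p = a + c ∧ q = b + d ∧ r = 2*a ∧ s = 2*b))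

-- the simulation invariant between A's state and B's state
def SimRel (sA sB : Int × List (Int × Int) × List (Int × Int × Int × Int) × Int × Int) : Prop :=
  match sA, sB with
  | (ansA, vv, ve, i, j), (ansB, V, E, x, y) =>
    ansB = ansA ∧ x = 2*i ∧ y = 2*j ∧
    (∀ a b c d, (a, b, c, d) ∈ ve → (c, d, a, b) ∈ ve) ∧
    (∀ a b c d, (a, b, c, d) ∈ ve →
      ((c - a = -1 ∨ c - a = 0 ∨ c - a = 1) ∧ (d - b = -1 ∨ d - b = 0 ∨ d - b = 1) ∧
       ¬(c = a ∧ d = b))) ∧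
    (∀ p q, (p, q) ∈ V ↔ VertRep vv ve p q) ∧
    (∀ p q r s, (p, q, r, s) ∈ E ↔ EdgeRep ve p q r s)

lemma ite_add_comm (p q : Prop) [Decidable p] [Decidable q] (n : Int) :
    (if p then (if q then n + 1 else n) + 1 else (if q then n + 1 else n)) =
    (if q then (if p then n + 1 else n) + 1 else (if p then n + 1 else n)) := by
  by_cases p <;> by_cases q <;> simp [*]

-- one loop iteration preserves the invariant
lemma solutionStep_eq (arrow u v : Int) (hget : PySem.List.pyGet? pvDirs arrow = some (u, v))
    (ans : Int) (vv : List (Int × Int)) (ve : List (Int × Int × Int × Int)) (i j : Int) :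
    solutionStep (ans, vv, ve, i, j) arrow =
      (if (i + u, j + v, i, j) ∉ ve ∧ PySem.Int.mod arrow 2 ≠ 0 ∧ (i + u, j, i, j + v) ∈ ve
        then (if (i + u, j + v, i, j) ∉ ve ∧ (i + u, j + v) ∈ vv then ans + 1 else ans) + 1
        else (if (i + u, j + v, i, j) ∉ ve ∧ (i + u, j + v) ∈ vv then ans + 1 else ans),
       PySem.Set.add vv (i + u, j + v),
       PySem.Set.add (PySem.Set.add ve (i + u, j + v, i, j)) (i, j, i + u, j + v),
       i + u, j + v) := by
  simp [solutionStep, hget]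

lemma solutionAltHalf_eq (u v : Int) (ans : Int) (V : List (Int × Int))
    (E : List (Int × Int × Int × Int)) (x y : Int) :
    solutionAltHalf u v (ans, V, E, x, y) =
      (if (x + u, y + v, x, y) ∉ E ∧ (x + u, y + v) ∈ V then ans + 1 else ans,
       PySem.Set.add V (x + u, y + v),
       PySem.Set.add (PySem.Set.add E (x + u, y + v, x, y)) (x, y, x + u, y + v),
       x + u, y + v) := by
  simp [solutionAltHalf]

lemma solutionAltStep_eq (arrow u v : Int) (hget : PySem.List.pyGet? pvDirs arrow = some (u, v))
    (st : Int × List (Int × Int) × List (Int × Int × Int × Int) × Int × Int) :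
    solutionAltStep st arrow = solutionAltHalf u v (solutionAltHalf u v st) := by
  simp [solutionAltStep, hget]

lemma SimRel_iff (ansA ansB i j x y : Int) (vv V : List (Int × Int))
    (ve E : List (Int × Int × Int × Int)) :
    SimRel (ansA, vv, ve, i, j) (ansB, V, E, x, y) ↔
    (ansB = ansA ∧ x = 2*i ∧ y = 2*j ∧
    (∀ a b c d, (a, b, c, d) ∈ ve → (c, d, a, b) ∈ ve) ∧
    (∀ a b c d, (a, b, c, d) ∈ ve →
      ((c - a = -1 ∨ c - a = 0 ∨ c - a = 1) ∧ (d - b = -1 ∨ d - b = 0 ∨ d - b = 1) ∧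
       ¬(c = a ∧ d = b))) ∧
    (∀ p q, (p, q) ∈ V ↔ VertRep vv ve p q) ∧
    (∀ p q r s, (p, q, r, s) ∈ E ↔ EdgeRep ve p q r s)) := Iff.rfl

-- one loop iteration preserves the invariant
set_option maxHeartbeats 2000000 in
lemma step_inv (arrow : Int)
    (sA sB : Int × List (Int × Int) × List (Int × Int × Int × Int) × Int × Int)
    (h : SimRel sA sB) : SimRel (solutionStep sA arrow) (solutionAltStep sB arrow) := by
  obtain ⟨ansA, vv, ve, i, j⟩ := sA
  obtain ⟨ansB, V, E, x, y⟩ := sB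
  obtain ⟨hba, hx, hy, hsym, hunit, hV, hE⟩ := h
  subst hba hx hy
  rcases hget : PySem.List.pyGet? pvDirs arrow with _ | ⟨u, v⟩
  · simp only [solutionStep, solutionAltStep, hget]
    exact ⟨rfl, rfl, rfl, hsym, hunit, hV, hE⟩
  obtain ⟨hu, hv, hnz, hpar⟩ := dirs_facts arrow u v hget
  rw [solutionStep_eq arrow u v hget, solutionAltStep_eq arrow u v hget,
    solutionAltHalf_eq, solutionAltHalf_eq, SimRel_iff]
  simp only [ne_eq, hpar]
  clear hpar hget
  -- the two edge tests and two vertex tests of B, translated through the invariant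
  have he1 : ((2*i + u, 2*j + v, 2*i, 2*j) ∈ E) ↔ ((i + u, j + v, i, j) ∈ ve) := by
    rw [hE]
    constructor
    · rintro ⟨a, b, c, d, hm, hc⟩
      have hub := hunit a b c d hm
      have key : a = i ∧ b = j ∧ c = i + u ∧ d = j + v := by omega
      obtain ⟨rfl, rfl, rfl, rfl⟩ := key
      exact hsym _ _ _ _ hm
    · intro hm
      exact ⟨i, j, i + u, j + v, hsym _ _ _ _ hm, Or.inr (by omega)⟩
  have hv1 : ((2*i + u, 2*j + v) ∈ V) ↔
      ((i + u, j + v, i, j) ∈ ve ∨ ((u ≠ 0 ∧ v ≠ 0) ∧ (i + u, j, i, j + v) ∈ ve)) := by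
    rw [hV]
    constructor
    · rintro (⟨a, b, hp, hq, hm⟩ | ⟨a, b, c, d, hm, hp, hq⟩)
      · exfalso; omega
      · have hub := hunit a b c d hm
        have h1 : c - a = u ∨ c - a = -u := by omega
        have h2 : d - b = v ∨ d - b = -v := by omega
        rcases h1 with h1 | h1 <;> rcases h2 with h2 | h2
        · -- the segment (pre, cur) itself
          have key : a = i ∧ b = j ∧ c = i + u ∧ d = j + v := by omega
          obtain ⟨rfl, rfl, rfl, rfl⟩ := key
          exact Or.inl (hsym _ _ _ _ hm)
        · -- the crossing diagonal (or the segment itself when u or v is 0)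
          by_cases hv0 : v = 0
          · have key : a = i ∧ b = j ∧ c = i + u ∧ d = j + v := by omega
            obtain ⟨rfl, rfl, rfl, rfl⟩ := key
            exact Or.inl (hsym _ _ _ _ hm)
          · by_cases hu0 : u = 0
            · have key : a = i + u ∧ b = j + v ∧ c = i ∧ d = j := by omega
              obtain ⟨rfl, rfl, rfl, rfl⟩ := key
              exact Or.inl hm
            · have key : a = i ∧ b = j + v ∧ c = i + u ∧ d = j := by omega
              obtain ⟨rfl, rfl, rfl, rfl⟩ := key
              exact Or.inr ⟨⟨hu0, hv0⟩, hsym _ _ _ _ hm⟩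
        · -- the crossing diagonal, reversed (or the segment when u or v is 0)
          by_cases hu0 : u = 0
          · have key : a = i ∧ b = j ∧ c = i + u ∧ d = j + v := by omega
            obtain ⟨rfl, rfl, rfl, rfl⟩ := key
            exact Or.inl (hsym _ _ _ _ hm)
          · by_cases hv0 : v = 0
            · have key : a = i + u ∧ b = j + v ∧ c = i ∧ d = j := by omega
              obtain ⟨rfl, rfl, rfl, rfl⟩ := key
              exact Or.inl hm
            · have key : a = i + u ∧ b = j ∧ c = i ∧ d = j + v := by omega
              obtain ⟨rfl, rfl, rfl, rfl⟩ := key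
              exact Or.inr ⟨⟨hu0, hv0⟩, hm⟩
        · -- the reversed segment (cur, pre)
          have key : a = i + u ∧ b = j + v ∧ c = i ∧ d = j := by omega
          obtain ⟨rfl, rfl, rfl, rfl⟩ := key
          exact Or.inl hm
    · rintro (hm | ⟨hd0, hm⟩)
      · exact Or.inr ⟨i + u, j + v, i, j, hm, by omega, by omega⟩
      · exact Or.inr ⟨i + u, j, i, j + v, hm, by omega, by omega⟩
  have he2 : ((2*i + u + u, 2*j + v + v, 2*i + u, 2*j + v) ∈
      PySem.Set.add (PySem.Set.add E (2*i + u, 2*j + v, 2*i, 2*j)) (2*i, 2*j, 2*i + u, 2*j + v))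
      ↔ ((i + u, j + v, i, j) ∈ ve) := by
    simp only [PySem.Set.mem_add, Prod.mk.injEq]
    constructor
    · rintro ((hmem | heq) | heq)
      · rw [hE] at hmem
        obtain ⟨a, b, c, d, hm, hc⟩ := hmem
        have hub := hunit a b c d hm
        have key : a = i + u ∧ b = j + v ∧ c = i ∧ d = j := by omega
        obtain ⟨rfl, rfl, rfl, rfl⟩ := key
        exact hm
      · exfalso; omega
      · exfalso; omega
    · intro hm
      exact Or.inl (Or.inl ((hE _ _ _ _).2 ⟨i + u, j + v, i, j, hm, Or.inl (by omega)⟩))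
  have hv2 : ((2*i + u + u, 2*j + v + v) ∈ PySem.Set.add V (2*i + u, 2*j + v)) ↔
      ((i + u, j + v) ∈ vv) := by
    simp only [PySem.Set.mem_add, Prod.mk.injEq]
    rw [hV]
    constructor
    · rintro ((⟨a, b, hp, hq, hm⟩ | ⟨a, b, c, d, hm, hp, hq⟩) | heq)
      · have key : a = i + u ∧ b = j + v := by omega
        obtain ⟨rfl, rfl⟩ := key
        exact hm
      · exfalso
        have hub := hunit a b c d hm
        omega
      · exfalso; omega
    · intro hm
      exact Or.inl (Or.inl ⟨i + u, j + v, by omega, by omega, hm⟩)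
  refine ⟨?_, by ring, by ring, ?_, ?_, ?_, ?_⟩
  · -- the answer components agree: B's two half-step increments are A's two
    -- increments in the opposite order
    have hc1 : (¬(2*i + u, 2*j + v, 2*i, 2*j) ∈ E ∧ (2*i + u, 2*j + v) ∈ V) ↔
        (¬(i + u, j + v, i, j) ∈ ve ∧ ¬(u = 0 ∨ v = 0) ∧ (i + u, j, i, j + v) ∈ ve) := by
      rw [he1, hv1]
      constructor
      · rintro ⟨hne, hmem | ⟨hd, hcr⟩⟩
        · exact absurd hmem hne
        · exact ⟨hne, by tauto, hcr⟩
      · rintro ⟨hne, hd, hcr⟩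
        exact ⟨hne, Or.inr ⟨⟨fun h0 => hd (Or.inl h0), fun h0 => hd (Or.inr h0)⟩, hcr⟩⟩
    have hc2 : (¬(2*i + u + u, 2*j + v + v, 2*i + u, 2*j + v) ∈
        PySem.Set.add (PySem.Set.add E (2*i + u, 2*j + v, 2*i, 2*j)) (2*i, 2*j, 2*i + u, 2*j + v) ∧
        (2*i + u + u, 2*j + v + v) ∈ PySem.Set.add V (2*i + u, 2*j + v)) ↔
        (¬(i + u, j + v, i, j) ∈ ve ∧ (i + u, j + v) ∈ vv) := by
      rw [he2, hv2]
    simp only [hc1, hc2]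
    exact (ite_add_comm _ _ _).symm
  · -- symmetry of visit_e is preserved
    intro a b c d hm
    simp only [PySem.Set.mem_add, Prod.mk.injEq] at hm ⊢
    rcases hm with (hm | heq) | heq
    · exact Or.inl (Or.inl (hsym _ _ _ _ hm))
    · exact Or.inr (by omega)
    · exact Or.inl (Or.inr (by omega))
  · -- unit-step property of visit_e is preserved
    intro a b c d hm
    simp only [PySem.Set.mem_add, Prod.mk.injEq] at hm
    rcases hm with (hm | heq) | heq
    · exact hunit _ _ _ _ hm
    · omega
    · omega
  · -- vertex characterisation is preserved
    intro p q
    simp only [PySem.Set.mem_add, Prod.mk.injEq, hV, VertRep]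
    constructor
    · rintro (((⟨a, b, hp, hq, hm⟩ | ⟨a, b, c, d, hm, hp, hq⟩) | ⟨hp, hq⟩) | ⟨hp, hq⟩)
      · exact Or.inl ⟨a, b, hp, hq, Or.inl hm⟩
      · exact Or.inr ⟨a, b, c, d, Or.inl (Or.inl hm), hp, hq⟩
      · exact Or.inr ⟨i + u, j + v, i, j, Or.inl (Or.inr ⟨rfl, rfl, rfl, rfl⟩), by omega, by omega⟩
      · exact Or.inl ⟨i + u, j + v, by omega, by omega, Or.inr ⟨rfl, rfl⟩⟩
    · rintro (⟨a, b, hp, hq, hm | ⟨rfl, rfl⟩⟩ |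
        ⟨a, b, c, d, (hm | ⟨rfl, rfl, rfl, rfl⟩) | ⟨rfl, rfl, rfl, rfl⟩, hp, hq⟩)
      · exact Or.inl (Or.inl (Or.inl ⟨a, b, hp, hq, hm⟩))
      · exact Or.inr ⟨by omega, by omega⟩
      · exact Or.inl (Or.inl (Or.inr ⟨a, b, c, d, hm, hp, hq⟩))
      · exact Or.inl (Or.inr ⟨by omega, by omega⟩)
      · exact Or.inl (Or.inr ⟨by omega, by omega⟩)
  · -- edge characterisation is preserved
    intro p q r s
    simp only [PySem.Set.mem_add, Prod.mk.injEq, hE, EdgeRep]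
    constructor
    · rintro ((((⟨a, b, c, d, hm, hc⟩ | ⟨hp, hq, hr, hs⟩) | ⟨hp, hq, hr, hs⟩) |
        ⟨hp, hq, hr, hs⟩) | ⟨hp, hq, hr, hs⟩)
      · exact ⟨a, b, c, d, Or.inl (Or.inl hm), hc⟩
      · exact ⟨i, j, i + u, j + v, Or.inr ⟨rfl, rfl, rfl, rfl⟩, Or.inr (by omega)⟩
      · exact ⟨i, j, i + u, j + v, Or.inr ⟨rfl, rfl, rfl, rfl⟩, Or.inl (by omega)⟩
      · exact ⟨i + u, j + v, i, j, Or.inl (Or.inr ⟨rfl, rfl, rfl, rfl⟩), Or.inl (by omega)⟩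
      · exact ⟨i + u, j + v, i, j, Or.inl (Or.inr ⟨rfl, rfl, rfl, rfl⟩), Or.inr (by omega)⟩
    · rintro ⟨a, b, c, d, (hm | ⟨rfl, rfl, rfl, rfl⟩) | ⟨rfl, rfl, rfl, rfl⟩, hc | hc⟩
      · exact Or.inl (Or.inl (Or.inl (Or.inl ⟨a, b, c, d, hm, Or.inl hc⟩)))
      · exact Or.inl (Or.inl (Or.inl (Or.inl ⟨a, b, c, d, hm, Or.inr hc⟩)))
      · exact Or.inl (Or.inr (by omega))
      · exact Or.inr (by omega)
      · exact Or.inl (Or.inl (Or.inr (by omega)))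
      · exact Or.inl (Or.inl (Or.inl (Or.inr (by omega))))

lemma fold_inv (arrows : List Int)
    (sA sB : Int × List (Int × Int) × List (Int × Int × Int × Int) × Int × Int)
    (h : SimRel sA sB) : SimRel (arrows.foldl solutionStep sA) (arrows.foldl solutionAltStep sB) := by
  induction arrows generalizing sA sB with
  | nil => exact h
  | cons a t ih => exact ih _ _ (step_inv a _ _ h)

lemma init_inv :
    SimRel (0, PySem.Set.add PySem.Set.empty ((0 : Int), (0 : Int)), PySem.Set.empty, 0, 0)
        (0, PySem.Set.ofList [((0 : Int), (0 : Int))], PySem.Set.empty, 0, 0) := by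
  refine ⟨rfl, rfl, rfl, by simp [PySem.Set.empty], by simp [PySem.Set.empty], ?_, ?_⟩
  · intro p q
    simp [PySem.Set.empty, PySem.Set.add, PySem.Set.ofList, VertRep, PySem.Set.contains]
  · intro p q r s
    simp [PySem.Set.empty, EdgeRep]

-- ===== VERDICT (by name: the statement is the Claim_ definition above) =====
theorem solution_spec : Claim_equal_solution := by
  intro arrows _ _
  unfold Spec_solution solution solution_alt
  exact (fold_inv arrows _ _ init_inv).1.symm
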